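-- pv_equiv track=rewrite | github.com/DotSlash-A/trig | server/services/number_theory.py | lcm_from_prime_factorization
-- ===== SOURCE A (Python) =====
-- from typing import Dict, List, Tuple, Any, Optional
--
-- def lcm_from_prime_factorization(factors1: Dict[int, int], factors2: Dict[int, int]) -> int:
--     """
--     Calculates LCM from two prime factorization dictionaries.
--     """
--     lcm_val = 1
--     all_primes = set(factors1.keys()) | set(factors2.keys())
--     if not all_primes: # Both numbers were 1 or 0, resulting in empty factorizations
--         return 1 # LCM(1,1)=1. LCM involving 0 is tricky (often 0 or undefined).
--                  # Given we factorize abs(n), LCM(0, k) would become LCM of factors of 0 (empty) and k.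
--                  # Let's assume inputs to this function are derived from positive integers > 1.
--
--     for prime in all_primes:
--         power1 = factors1.get(prime, 0)
--         power2 = factors2.get(prime, 0)
--         lcm_val *= prime ** max(power1, power2)
--     return lcm_val
-- ===== SOURCE B (Python) =====
-- def lcm_from_prime_factorization(factors1, factors2):
--     """
--     Calculates LCM from two prime factorization dictionaries.
--     Reconstructs the first number, then multiplies in only the extra
--     prime powers where factors2 exceeds factors1.
--     """
--     result = 1
--     for prime, power in factors1.items():
--         result *= prime ** power
--     for prime, power in factors2.items():
--         result *= prime ** max(0, power - factors1.get(prime, 0))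
--     return result
-- ===== Notes on version B (the rewrite author's own statement) =====
-- stated objective: alternative
-- what changed: Instead of building the set union of the primes and taking prime**max(p1,p2) per union element, B reconstructs the first number as the product over factors1 and then multiplies in prime**max(0,p2-p1) per factors2 entry, so no union set and no max of the two exponents is ever formed.
-- outside the precondition, e.g. on lcm_from_prime_factorization({2: -1}, {2: 3}): A returns 8, B returns 8.0; on lcm_from_prime_factorization({2: -2}, {}): A returns 1, B returns 0.25
import Mathlib
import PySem

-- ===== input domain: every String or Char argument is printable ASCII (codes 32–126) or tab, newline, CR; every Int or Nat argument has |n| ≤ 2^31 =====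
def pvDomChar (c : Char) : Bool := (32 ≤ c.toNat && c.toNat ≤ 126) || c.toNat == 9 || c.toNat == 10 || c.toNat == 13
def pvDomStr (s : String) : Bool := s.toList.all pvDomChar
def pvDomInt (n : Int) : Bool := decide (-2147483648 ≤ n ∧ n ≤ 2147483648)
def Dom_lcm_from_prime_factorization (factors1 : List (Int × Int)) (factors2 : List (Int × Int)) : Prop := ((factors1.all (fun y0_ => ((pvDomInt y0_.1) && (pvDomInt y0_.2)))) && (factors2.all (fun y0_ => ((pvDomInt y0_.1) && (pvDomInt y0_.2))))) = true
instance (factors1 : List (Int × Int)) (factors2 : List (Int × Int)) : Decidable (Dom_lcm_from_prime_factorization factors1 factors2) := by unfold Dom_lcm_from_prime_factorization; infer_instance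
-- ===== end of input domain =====

-- B multiplies the extra prime powers of factors2 onto the reconstructed first number instead of
-- iterating over the union set with a max of exponents; same cost, different decomposition ("alternative").

-- ===== PORT A =====
def lcm_from_prime_factorization (factors1 : List (Int × Int)) (factors2 : List (Int × Int)) : Int :=
  let d1 := PySem.Dict.mk factors1
  let d2 := PySem.Dict.mk factors2
  let lcm_val : Int := 1
  let all_primes := PySem.Set.union (PySem.Set.ofList d1.keys) (PySem.Set.ofList d2.keys)
  if all_primes = [] then 1
  else
    all_primes.foldl (fun acc prime =>
      let power1 := d1.getD prime 0
      let power2 := d2.getD prime 0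
      acc * prime ^ (max power1 power2).toNat) lcm_val

-- ===== PORT B =====
def lcm_from_prime_factorization_alt (factors1 : List (Int × Int)) (factors2 : List (Int × Int)) : Int :=
  let d1 := PySem.Dict.mk factors1
  let r1 := factors1.foldl (fun acc pe => acc * pe.1 ^ pe.2.toNat) 1
  factors2.foldl (fun acc pe => acc * pe.1 ^ (max 0 (pe.2 - d1.getD pe.1 0)).toNat) r1

-- ===== PRECONDITION & SPEC =====
-- Pre_ excludes a negative exponent in factors1 (there B's 'prime ** power' is a float, leaving the
-- declared int type, while A's max may still clamp it to an int) and duplicate keys (a Python dict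
-- cannot hold duplicate keys; the assoc-list encoding with duplicates is ambiguous).
def Pre_lcm_from_prime_factorization (factors1 : List (Int × Int)) (factors2 : List (Int × Int)) : Prop :=
  (factors1.map Prod.fst).Nodup ∧ (factors2.map Prod.fst).Nodup ∧
  (factors1.all (fun pe => 0 ≤ pe.2) = true)
instance (factors1 : List (Int × Int)) (factors2 : List (Int × Int)) : Decidable (Pre_lcm_from_prime_factorization factors1 factors2) := by unfold Pre_lcm_from_prime_factorization; infer_instance
def pvWitness_lcm_from_prime_factorization : (List (Int × Int)) × (List (Int × Int)) := ([(2, 3), (5, 1)], [(2, 1), (3, 2)])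

def Spec_lcm_from_prime_factorization (factors1 : List (Int × Int)) (factors2 : List (Int × Int)) (out : Int) : Prop := out = lcm_from_prime_factorization_alt factors1 factors2
instance (factors1 : List (Int × Int)) (factors2 : List (Int × Int)) (out : Int) : Decidable (Spec_lcm_from_prime_factorization factors1 factors2 out) := by unfold Spec_lcm_from_prime_factorization; infer_instance

-- ===== CLAIM (what is proved, stated in full; the proofs are below) =====
def Claim_equal_lcm_from_prime_factorization : Prop := ∀ (factors1 : List (Int × Int)) (factors2 : List (Int × Int)), Dom_lcm_from_prime_factorization factors1 factors2 → Pre_lcm_from_prime_factorization factors1 factors2 → Spec_lcm_from_prime_factorization factors1 factors2 (lcm_from_prime_factorization factors1 factors2)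

-- ===== LEMMAS AND PROOFS =====

-- a multiplying loop is the product of the mapped list
theorem pvFoldlMul {α : Type} (l : List α) (f : α → Int) (a : Int) :
    l.foldl (fun acc x => acc * f x) a = a * (l.map f).prod := by
  induction l generalizing a with
  | nil => simp
  | cons x t ih => simp [ih, mul_assoc]

-- lookup of a key present in a nodup-key dict returns its stored value
theorem pvGetDMem (l : List (Int × Int)) (hnd : (l.map Prod.fst).Nodup)
    (p e : Int) (hmem : (p, e) ∈ l) : (PySem.Dict.mk l).getD p 0 = e :=
  PySem.Dict.getD_of_mem_items (PySem.Dict.mk l) hmem hnd 0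

-- lookup of an absent key gives the default
theorem pvGetDNotMem (l : List (Int × Int)) (p : Int) (h : p ∉ l.map Prod.fst) :
    (PySem.Dict.mk l).getD p 0 = 0 := by
  apply PySem.Dict.getD_of_not_contains
  cases hc : (PySem.Dict.mk l).contains p with
  | false => rfl
  | true =>
    exfalso
    have := (PySem.Dict.contains_iff_mem_keys (PySem.Dict.mk l) p).mp hc
    simp only [PySem.Dict.keys] at this
    exact h this

-- entries mapping to 1 can be dropped from a product
theorem pvProdFilterOne {α : Type} (l : List α) (f : α → Int) (P : α → Bool)
    (h : ∀ x ∈ l, P x = false → f x = 1) :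
    (l.map f).prod = ((l.filter P).map f).prod := by
  induction l with
  | nil => simp
  | cons x t ih =>
    by_cases hx : P x = true
    · simp [hx, ih (fun y hy => h y (List.mem_cons_of_mem _ hy))]
    · simp only [Bool.not_eq_true] at hx
      simp [hx, h x (List.mem_cons_self) hx,
        ih (fun y hy => h y (List.mem_cons_of_mem _ hy))]

-- a product splits along a filter and its complement
theorem pvProdFilterSplit {α : Type} (l : List α) (f : α → Int) (P : α → Bool) :
    (l.map f).prod = ((l.filter P).map f).prod * ((l.filter (fun x => !P x)).map f).prod := by
  induction l with
  | nil => simp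
  | cons x t ih =>
    by_cases hx : P x = true
    · simp [hx, ih, mul_assoc]
    · simp only [Bool.not_eq_true] at hx
      simp [hx, ih]
      ring

-- getD is nonnegative when all stored exponents are
theorem pvGetDNonneg (l : List (Int × Int)) (hnd : (l.map Prod.fst).Nodup)
    (ha : l.all (fun pe => 0 ≤ pe.2) = true) (p : Int) :
    0 ≤ (PySem.Dict.mk l).getD p 0 := by
  by_cases hm : p ∈ l.map Prod.fst
  · obtain ⟨⟨q, e⟩, hqe, hq⟩ := List.mem_map.mp hm
    simp only at hq
    subst hq
    rw [pvGetDMem l hnd q e hqe]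
    exact of_decide_eq_true (List.all_eq_true.mp ha _ hqe)
  · rw [pvGetDNotMem l p hm]

-- the core identity: the union-with-max product equals the K1 product times the clamped-excess K2 product
theorem pvCore (K1 K2 : List Int) (g1 g2 : Int → Int) (h1 : K1.Nodup) (h2 : K2.Nodup)
    (hg1nn : ∀ p, 0 ≤ g1 p)
    (hg1off : ∀ p, p ∉ K1 → g1 p = 0) (hg2off : ∀ p, p ∉ K2 → g2 p = 0) :
    ((K1 ++ K2.filter (fun y => !K1.contains y)).map
        (fun p => p ^ (max (g1 p) (g2 p)).toNat)).prod
      = (K1.map (fun p => p ^ (g1 p).toNat)).prod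
        * (K2.map (fun p => p ^ (max 0 (g2 p - g1 p)).toNat)).prod := by
  set F : Int → Int := fun p => p ^ (max (g1 p) (g2 p)).toNat with hF
  set G : Int → Int := fun p => p ^ (g1 p).toNat with hG
  set H : Int → Int := fun p => p ^ (max 0 (g2 p - g1 p)).toNat with hH
  set K2f : List Int := K2.filter (fun y => !K1.contains y) with hK2f
  have hFGH : ∀ p, F p = G p * H p := by
    intro p
    have e1 := hg1nn p
    simp only [hF, hG, hH]
    rw [← pow_add]
    congr 1
    omega
  have hFH : ∀ p ∈ K2f, F p = H p := by
    intro p hp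
    have hnot : p ∉ K1 := by
      have hb := (List.mem_filter.mp hp).2
      intro hmem
      rw [List.contains_iff_mem.mpr hmem] at hb
      cases hb
    have hg10 : g1 p = 0 := hg1off p hnot
    simp only [hF, hH]
    rw [hg10]
    congr 1
    omega
  have hHone : ∀ p ∈ K1, K2.contains p = false → H p = 1 := by
    intro p _ hpc
    have hnot : p ∉ K2 := fun hm => by rw [List.contains_iff_mem.mpr hm] at hpc; cases hpc
    have e1 := hg1nn p
    simp only [hH]
    rw [hg2off p hnot]
    have : (max 0 (0 - g1 p)).toNat = 0 := by omega
    rw [this, pow_zero]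
  have hperm : (K1.filter (fun p => K2.contains p)).Perm (K2.filter (fun p => K1.contains p)) := by
    rw [List.perm_ext_iff_of_nodup (h1.filter _) (h2.filter _)]
    intro a
    simp only [List.mem_filter, List.contains_iff_mem]
    exact ⟨fun ⟨x, y⟩ => ⟨y, x⟩, fun ⟨x, y⟩ => ⟨y, x⟩⟩
  rw [List.map_append, List.prod_append]
  have hK1F : (K1.map F).prod = (K1.map G).prod * (K1.map H).prod := by
    rw [← List.prod_map_mul]
    congr 1
    exact List.map_congr_left (fun p _ => hFGH p)
  have hK2fF : (K2f.map F).prod = (K2f.map H).prod := by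
    congr 1
    exact List.map_congr_left hFH
  rw [hK1F, hK2fF]
  have hK1H : (K1.map H).prod = ((K1.filter (fun p => K2.contains p)).map H).prod :=
    pvProdFilterOne K1 H _ (fun p hp hf => hHone p hp hf)
  have hK2H : (K2.map H).prod
      = ((K2.filter (fun p => K1.contains p)).map H).prod * (K2f.map H).prod := by
    rw [pvProdFilterSplit K2 H (fun p => K1.contains p)]
  have hcross : ((K1.filter (fun p => K2.contains p)).map H).prod
      = ((K2.filter (fun p => K1.contains p)).map H).prod :=
    (hperm.map H).prod_eq
  rw [hK1H, hcross, hK2H]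
  ring

-- ===== VERDICT (by name: the statement is the Claim_ definition above) =====
theorem lcm_from_prime_factorization_spec : Claim_equal_lcm_from_prime_factorization := by
  intro f1 f2 _ hpre
  obtain ⟨h1, h2, ha1⟩ := hpre
  unfold Spec_lcm_from_prime_factorization lcm_from_prime_factorization lcm_from_prime_factorization_alt
  simp only [PySem.Dict.keys, PySem.Set.union]
  set K1 : List Int := f1.map Prod.fst with hK1
  set K2 : List Int := f2.map Prod.fst with hK2
  have hunion : PySem.Set.update (PySem.Set.ofList K1) (PySem.Set.ofList K2)
      = K1 ++ K2.filter (fun y => !K1.contains y) := by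
    rw [PySem.Set.update_eq_append_filter, PySem.Set.ofList_eq_self_of_nodup K1 h1,
      PySem.Set.ofList_ofList, PySem.Set.ofList_eq_self_of_nodup K2 h2]
    congr 1
  rw [hunion]
  have hB1 : f1.foldl (fun acc pe => acc * pe.1 ^ pe.2.toNat) 1
      = (K1.map (fun p => p ^ ((PySem.Dict.mk f1).getD p 0).toNat)).prod := by
    rw [pvFoldlMul, one_mul, hK1, List.map_map]
    congr 1
    apply List.map_congr_left
    intro ⟨p, e⟩ hpe
    simp only [Function.comp]
    rw [pvGetDMem f1 h1 p e hpe]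
  have hB2 : ∀ r : Int,
      f2.foldl (fun acc pe =>
          acc * pe.1 ^ (max 0 (pe.2 - (PySem.Dict.mk f1).getD pe.1 0)).toNat) r
      = r * (K2.map (fun p =>
          p ^ (max 0 ((PySem.Dict.mk f2).getD p 0 - (PySem.Dict.mk f1).getD p 0)).toNat)).prod := by
    intro r
    rw [pvFoldlMul, hK2, List.map_map]
    congr 2
    apply List.map_congr_left
    intro ⟨p, e⟩ hpe
    simp only [Function.comp]
    rw [pvGetDMem f2 h2 p e hpe]
  set K2f : List Int := K2.filter (fun y => !K1.contains y) with hK2f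
  by_cases hemp : K1 ++ K2f = []
  · rw [hemp]
    have hK1e : K1 = [] := by
      cases hc : K1 with
      | nil => rfl
      | cons a t => rw [hc] at hemp; simp at hemp
    have hf1 : f1 = [] := List.map_eq_nil_iff.mp hK1e
    have hK2e : K2 = [] := by
      cases hc : K2 with
      | nil => rfl
      | cons a t =>
        exfalso
        rw [hK2f, hK1e, hc] at hemp
        simp at hemp
    have hf2 : f2 = [] := List.map_eq_nil_iff.mp (hK2 ▸ hK2e)
    subst hf1; subst hf2
    simp
  · rw [if_neg hemp, pvFoldlMul, hB2, hB1, one_mul]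
    exact pvCore K1 K2
      (fun p => (PySem.Dict.mk f1).getD p 0) (fun p => (PySem.Dict.mk f2).getD p 0)
      h1 h2 (pvGetDNonneg f1 h1 ha1)
      (fun p hp => pvGetDNotMem f1 p hp) (fun p hp => pvGetDNotMem f2 p hp)
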